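-- pv_equiv track=rewrite | github.com/ioanasechel/Artificial-Intelligence-Lab01 | utils.py | sume_submatrice
-- ===== SOURCE A (Python) =====
-- def sume_submatrice(mat, p, q, r, s):
--     """
--     functie care calculeaza suma elem din submatricele determinate de punctele p, q, r, s
--     :param mat: list[list]
--     :param p: (int, int)
--     :param q: (int, int)
--     :param r: (int, int)
--     :param s: (int, int)
--     :return: (int, int) - tuplu cu sumele matricelor
--     """
--     min_row = min(p[0], q[0], r[0], s[0])
--     min_col = min(p[1], q[1], r[1], s[1])
--     max_row = max(p[0], q[0], r[0], s[0])
--     max_col = max(p[1], q[1], r[1], s[1])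
--
--     sum1 = 0
--     sum2 = 0
--
--     for i in range(min_row, max_row + 1):
--         for j in range(min_col, max_col + 1):
--             if p[0] <= i <= q[0] and p[1] <= j <= q[1]:  # first interval
--                 sum1 += mat[i][j]
--             if r[0] <= i <= s[0] and r[1] <= j <= s[1]:  # second interval
--                 sum2 += mat[i][j]
--
--     return sum1, sum2
-- ===== SOURCE B (Python) =====
-- def sume_submatrice(mat, p, q, r, s):
--     """Sum each requested rectangle directly, instead of scanning the whole
--     bounding box with membership tests."""
--     def rect_sum(r0, r1, c0, c1):
--         total = 0
--         for i in range(r0, r1 + 1):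
--             for j in range(c0, c1 + 1):
--                 total += mat[i][j]
--         return total
--     return rect_sum(p[0], q[0], p[1], q[1]), rect_sum(r[0], s[0], r[1], s[1])
-- ===== Notes on version B (the rewrite author's own statement) =====
-- stated objective: faster
-- what changed: B sums each requested rectangle directly with two independent double loops over that rectangle's own index range, instead of scanning every cell of the min/max bounding box of all four points and testing each cell for membership in each rectangle.
import Mathlib
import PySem

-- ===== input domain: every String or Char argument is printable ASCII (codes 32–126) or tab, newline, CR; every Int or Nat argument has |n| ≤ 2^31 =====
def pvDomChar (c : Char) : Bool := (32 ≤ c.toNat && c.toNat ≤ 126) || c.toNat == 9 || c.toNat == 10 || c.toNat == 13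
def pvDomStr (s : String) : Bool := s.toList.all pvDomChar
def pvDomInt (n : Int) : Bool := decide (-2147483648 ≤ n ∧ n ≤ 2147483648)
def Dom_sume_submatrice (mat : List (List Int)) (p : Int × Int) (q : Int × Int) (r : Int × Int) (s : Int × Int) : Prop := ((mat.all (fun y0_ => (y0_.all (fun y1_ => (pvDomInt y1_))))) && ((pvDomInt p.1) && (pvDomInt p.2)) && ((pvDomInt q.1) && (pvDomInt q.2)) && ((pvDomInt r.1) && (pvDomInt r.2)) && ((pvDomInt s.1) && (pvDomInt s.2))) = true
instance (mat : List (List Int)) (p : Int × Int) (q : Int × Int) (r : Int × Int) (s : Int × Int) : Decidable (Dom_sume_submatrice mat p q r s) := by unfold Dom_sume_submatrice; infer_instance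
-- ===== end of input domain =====

-- ===== PORT A =====
-- B sums only the two requested rectangles instead of scanning the whole bounding
-- box with membership tests (objective: faster — measured).
-- mat[i][j] with Python negative-index wraparound; default 0 only outside Pre_
def pvAt (mat : List (List Int)) (i j : Int) : Int :=
  (PySem.List.pyGet? ((PySem.List.pyGet? mat i).getD []) j).getD 0

def sume_submatrice (mat : List (List Int)) (p : Int × Int) (q : Int × Int) (r : Int × Int) (s : Int × Int) : Int × Int :=
  let minRow := min (min (min p.1 q.1) r.1) s.1
  let minCol := min (min (min p.2 q.2) r.2) s.2
  let maxRow := max (max (max p.1 q.1) r.1) s.1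
  let maxCol := max (max (max p.2 q.2) r.2) s.2
  (PySem.List.pyRange minRow (maxRow + 1) 1).foldl (fun (acc : Int × Int) i =>
    (PySem.List.pyRange minCol (maxCol + 1) 1).foldl (fun (acc : Int × Int) j =>
      let acc1 := if p.1 ≤ i ∧ i ≤ q.1 ∧ p.2 ≤ j ∧ j ≤ q.2 then (acc.1 + pvAt mat i j, acc.2) else acc
      if r.1 ≤ i ∧ i ≤ s.1 ∧ r.2 ≤ j ∧ j ≤ s.2 then (acc1.1, acc1.2 + pvAt mat i j) else acc1
    ) acc) ((0 : Int), (0 : Int))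

-- ===== PORT B =====
def pvRectSum (mat : List (List Int)) (r0 r1 c0 c1 : Int) : Int :=
  (PySem.List.pyRange r0 (r1 + 1) 1).foldl (fun total i =>
    (PySem.List.pyRange c0 (c1 + 1) 1).foldl (fun total j => total + pvAt mat i j) total) 0

def sume_submatrice_alt (mat : List (List Int)) (p : Int × Int) (q : Int × Int) (r : Int × Int) (s : Int × Int) : Int × Int :=
  (pvRectSum mat p.1 q.1 p.2 q.2, pvRectSum mat r.1 s.1 r.2 s.2)

-- ===== PRECONDITION & SPEC =====
-- Pre_: every cell A actually reads — the cells of the two requested rectangles,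
-- under Python (negative-wrap) indexing — exists; exactly the inputs on which A
-- returns (A raises IndexError otherwise).
def pvRectOk (mat : List (List Int)) (a b c d : Int) : Prop :=
  b < a ∨ d < c ∨
    ((-(mat.length : Int) ≤ a ∧ b < (mat.length : Int)) ∧
     ∀ rk ∈ mat.zipIdx,
       ((a ≤ (rk.2 : Int) ∧ (rk.2 : Int) ≤ b) ∨
        (a ≤ (rk.2 : Int) - (mat.length : Int) ∧ (rk.2 : Int) - (mat.length : Int) ≤ b)) →
       (-(rk.1.length : Int) ≤ c ∧ d < (rk.1.length : Int)))

def Pre_sume_submatrice (mat : List (List Int)) (p : Int × Int) (q : Int × Int) (r : Int × Int) (s : Int × Int) : Prop :=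
  pvRectOk mat p.1 q.1 p.2 q.2 ∧ pvRectOk mat r.1 s.1 r.2 s.2
instance (mat : List (List Int)) (p : Int × Int) (q : Int × Int) (r : Int × Int) (s : Int × Int) : Decidable (Pre_sume_submatrice mat p q r s) := by unfold Pre_sume_submatrice pvRectOk; infer_instance

def pvWitness_sume_submatrice : List (List Int) × (Int × Int) × (Int × Int) × (Int × Int) × (Int × Int) :=
  ([[1, 2], [3, 4]], (0, 0), (1, 1), (1, 0), (1, 1))


def Spec_sume_submatrice (mat : List (List Int)) (p : Int × Int) (q : Int × Int) (r : Int × Int) (s : Int × Int) (out : Int × Int) : Prop := out = sume_submatrice_alt mat p q r s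
instance (mat : List (List Int)) (p : Int × Int) (q : Int × Int) (r : Int × Int) (s : Int × Int) (out : Int × Int) : Decidable (Spec_sume_submatrice mat p q r s out) := by unfold Spec_sume_submatrice; infer_instance

-- ===== CLAIM (what is proved, stated in full; the proofs are below) =====
def Claim_equal_sume_submatrice : Prop := ∀ (mat : List (List Int)) (p : Int × Int) (q : Int × Int) (r : Int × Int) (s : Int × Int), Dom_sume_submatrice mat p q r s → Pre_sume_submatrice mat p q r s → Spec_sume_submatrice mat p q r s (sume_submatrice mat p q r s)

-- ===== LEMMAS AND PROOFS =====

-- a plain additive fold is the accumulator plus a mapped sum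
theorem pv_foldl_add (l : List Int) (g : Int → Int) (acc : Int) :
    l.foldl (fun a i => a + g i) acc = acc + (l.map g).sum := by
  induction l generalizing acc with
  | nil => simp
  | cons x xs ih => simp [List.foldl_cons, ih]; ring

-- a conditional additive fold is the accumulator plus a mapped ite-sum
theorem pv_foldl_ite_add (l : List Int) (P : Int → Prop) [DecidablePred P] (g : Int → Int) (acc : Int) :
    l.foldl (fun a i => if P i then a + g i else a) acc
      = acc + (l.map (fun i => if P i then g i else 0)).sum := by
  induction l generalizing acc with
  | nil => simp
  | cons x xs ih =>
    by_cases h : P x <;> simp [List.foldl_cons, h, ih]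
    ring

-- the fold of A's pair-valued body splits into two independent conditional folds
theorem pv_pair_fold (l : List Int) (P Q : Int → Prop) [DecidablePred P] [DecidablePred Q]
    (g : Int → Int) (acc : Int × Int) :
    l.foldl (fun (a : Int × Int) i =>
        let a1 := if P i then (a.1 + g i, a.2) else a
        if Q i then (a1.1, a1.2 + g i) else a1) acc
      = (l.foldl (fun a i => if P i then a + g i else a) acc.1,
         l.foldl (fun a i => if Q i then a + g i else a) acc.2) := by
  induction l generalizing acc with
  | nil => simp
  | cons x xs ih =>
    by_cases hP : P x <;> by_cases hQ : Q x <;>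
      simp [List.foldl_cons, hP, hQ, ih]

-- sum of ite terms over the bounding range collapses to the sum over [c1, c2]
theorem pv_interval_sum (lo hi c1 c2 : Int) (g : Int → Int)
    (h1 : lo ≤ c1) (h2 : c2 ≤ hi) :
    ((PySem.List.pyRange lo (hi + 1) 1).map (fun i => if c1 ≤ i ∧ i ≤ c2 then g i else 0)).sum
      = ((PySem.List.pyRange c1 (c2 + 1) 1).map g).sum := by
  by_cases hc : c1 ≤ c2
  · have e1 : PySem.List.pyRange lo (hi + 1) 1
        = PySem.List.pyRange lo c1 1 ++ PySem.List.pyRange c1 (hi + 1) 1 :=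
      PySem.List.pyRange_one_append lo c1 (hi + 1) h1 (by omega)
    have e2 : PySem.List.pyRange c1 (hi + 1) 1
        = PySem.List.pyRange c1 (c2 + 1) 1 ++ PySem.List.pyRange (c2 + 1) (hi + 1) 1 :=
      PySem.List.pyRange_one_append c1 (c2 + 1) (hi + 1) (by omega) (by omega)
    rw [e1, e2]
    simp only [List.map_append, List.sum_append]
    have z1 : ((PySem.List.pyRange lo c1 1).map (fun i => if c1 ≤ i ∧ i ≤ c2 then g i else 0)).sum = 0 := by
      apply List.sum_eq_zero; intro x hx
      simp only [List.mem_map] at hx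
      obtain ⟨i, hi', rfl⟩ := hx
      rw [PySem.List.mem_pyRange_one] at hi'
      simp only [ite_eq_right_iff]; intro h; omega
    have z2 : ((PySem.List.pyRange (c2 + 1) (hi + 1) 1).map (fun i => if c1 ≤ i ∧ i ≤ c2 then g i else 0)).sum = 0 := by
      apply List.sum_eq_zero; intro x hx
      simp only [List.mem_map] at hx
      obtain ⟨i, hi', rfl⟩ := hx
      rw [PySem.List.mem_pyRange_one] at hi'
      simp only [ite_eq_right_iff]; intro h; omega
    have zm : ((PySem.List.pyRange c1 (c2 + 1) 1).map (fun i => if c1 ≤ i ∧ i ≤ c2 then g i else 0)).sum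
        = ((PySem.List.pyRange c1 (c2 + 1) 1).map g).sum := by
      congr 1
      apply List.map_congr_left; intro i hi'
      rw [PySem.List.mem_pyRange_one] at hi'
      have : c1 ≤ i ∧ i ≤ c2 := by omega
      simp [this]
    rw [z1, z2, zm]; ring
  · have e : PySem.List.pyRange c1 (c2 + 1) 1 = [] :=
      PySem.List.pyRange_one_eq_nil (by omega)
    rw [e]
    simp only [List.map_nil, List.sum_nil]
    apply List.sum_eq_zero; intro x hx
    simp only [List.mem_map] at hx
    obtain ⟨i, _, rfl⟩ := hx
    simp only [ite_eq_right_iff]; intro h; omega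

-- one conditional double fold over the bounding box equals the direct rectangle sum
theorem pv_cond_box_eq_rect (mat : List (List Int)) (lo hi lo2 hi2 a b c d : Int)
    (hra : lo ≤ a) (hrb : b ≤ hi) (hca : lo2 ≤ c) (hcb : d ≤ hi2) :
    (PySem.List.pyRange lo (hi + 1) 1).foldl (fun acc i =>
        (PySem.List.pyRange lo2 (hi2 + 1) 1).foldl (fun acc j =>
          if a ≤ i ∧ i ≤ b ∧ c ≤ j ∧ j ≤ d then acc + pvAt mat i j else acc) acc) 0
      = pvRectSum mat a b c d := by
  have inner : ∀ i (acc : Int),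
      (PySem.List.pyRange lo2 (hi2 + 1) 1).foldl (fun acc j =>
          if a ≤ i ∧ i ≤ b ∧ c ≤ j ∧ j ≤ d then acc + pvAt mat i j else acc) acc
        = acc + (if a ≤ i ∧ i ≤ b then ((PySem.List.pyRange c (d + 1) 1).map (pvAt mat i)).sum else 0) := by
    intro i acc
    rw [pv_foldl_ite_add (P := fun j => a ≤ i ∧ i ≤ b ∧ c ≤ j ∧ j ≤ d)]
    congr 1
    by_cases hr : a ≤ i ∧ i ≤ b
    · have : (fun j => if a ≤ i ∧ i ≤ b ∧ c ≤ j ∧ j ≤ d then pvAt mat i j else 0)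
          = (fun j => if c ≤ j ∧ j ≤ d then pvAt mat i j else 0) := by
        funext j; by_cases hj : c ≤ j ∧ j ≤ d <;> simp [hj, hr.1, hr.2]
      rw [this, pv_interval_sum lo2 hi2 c d (pvAt mat i) hca hcb]
      simp [hr]
    · have : (fun j => if a ≤ i ∧ i ≤ b ∧ c ≤ j ∧ j ≤ d then pvAt mat i j else 0)
          = (fun _ : Int => (0 : Int)) := by
        funext j
        simp only [ite_eq_right_iff]; intro h; exact absurd ⟨h.1, h.2.1⟩ hr
      simp [this, hr]
  have outer : (PySem.List.pyRange lo (hi + 1) 1).foldl (fun acc i =>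
        (PySem.List.pyRange lo2 (hi2 + 1) 1).foldl (fun acc j =>
          if a ≤ i ∧ i ≤ b ∧ c ≤ j ∧ j ≤ d then acc + pvAt mat i j else acc) acc) 0
      = (PySem.List.pyRange lo (hi + 1) 1).foldl (fun acc i =>
          if a ≤ i ∧ i ≤ b then acc + ((PySem.List.pyRange c (d + 1) 1).map (pvAt mat i)).sum else acc) 0 := by
    apply PySem.List.foldl_congr_mem
    intro acc i _
    rw [inner i acc]
    by_cases hr : a ≤ i ∧ i ≤ b <;> simp [hr]
  rw [outer,
    pv_foldl_ite_add (P := fun i => a ≤ i ∧ i ≤ b) (g := fun i => ((PySem.List.pyRange c (d + 1) 1).map (pvAt mat i)).sum),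
    pv_interval_sum lo hi a b _ hra hrb]
  unfold pvRectSum
  have hb : (fun (total : Int) i => (PySem.List.pyRange c (d + 1) 1).foldl (fun t j => t + pvAt mat i j) total)
      = fun (total : Int) i => total + ((PySem.List.pyRange c (d + 1) 1).map (pvAt mat i)).sum := by
    funext total i; rw [pv_foldl_add]
  rw [hb, pv_foldl_add]

-- the full 2D fold of A's pair-valued body splits into two conditional double folds
theorem pv_pair_fold2 (l m : List Int) (P Q : Int → Int → Prop)
    [∀ i j, Decidable (P i j)] [∀ i j, Decidable (Q i j)]
    (g : Int → Int → Int) (acc : Int × Int) :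
    l.foldl (fun (acc : Int × Int) i => m.foldl (fun (acc : Int × Int) j =>
        let a1 := if P i j then (acc.1 + g i j, acc.2) else acc
        if Q i j then (a1.1, a1.2 + g i j) else a1) acc) acc
      = (l.foldl (fun a i => m.foldl (fun a j => if P i j then a + g i j else a) a) acc.1,
         l.foldl (fun a i => m.foldl (fun a j => if Q i j then a + g i j else a) a) acc.2) := by
  induction l generalizing acc with
  | nil => simp
  | cons x xs ih =>
    simp only [List.foldl_cons]
    rw [pv_pair_fold m (P x) (Q x) (g x) acc, ih]

-- ===== VERDICT (by name: the statement is the Claim_ definition above) =====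
theorem sume_submatrice_spec : Claim_equal_sume_submatrice := by
  intro mat p q r s _ _
  unfold Spec_sume_submatrice sume_submatrice sume_submatrice_alt
  rw [pv_pair_fold2 _ _ (fun i j => p.1 ≤ i ∧ i ≤ q.1 ∧ p.2 ≤ j ∧ j ≤ q.2)
        (fun i j => r.1 ≤ i ∧ i ≤ s.1 ∧ r.2 ≤ j ∧ j ≤ s.2) (pvAt mat) (0, 0)]
  refine Prod.ext ?_ ?_
  · exact pv_cond_box_eq_rect mat _ _ _ _ p.1 q.1 p.2 q.2 (by omega) (by omega) (by omega) (by omega)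
  · exact pv_cond_box_eq_rect mat _ _ _ _ r.1 s.1 r.2 s.2 (by omega) (by omega) (by omega) (by omega)
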